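-- pv_equiv track=rewrite | github.com/thanh-cyber/backtestlibrary | io.py | ordered_trades_export_columns
-- ===== SOURCE A (Python) =====
-- from typing import List, Optional, Union
--
-- def ordered_trades_export_columns(columns: list) -> List[str]:
--     """
--     Column order for exports: all non-snapshot columns first (original order), then Entry_Col_*,
--     Exit_Col_*, Continuous_Col_* (each group sorted alphabetically).
--     """
--     cols = list(columns)
--     entry = sorted(c for c in cols if str(c).startswith("Entry_"))
--     exit_c = sorted(c for c in cols if str(c).startswith("Exit_"))
--     cont = sorted(c for c in cols if str(c).startswith("Continuous_"))
--     tagged = set(entry) | set(exit_c) | set(cont)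
--     rest = [c for c in cols if c not in tagged]
--     return rest + entry + exit_c + cont
-- ===== SOURCE B (Python) =====
-- def ordered_trades_export_columns(columns: list) -> list:
--     """Single pass: bucket each column by prefix, then sort the three snapshot groups."""
--     rest, entry, exit_c, cont = [], [], [], []
--     for c in columns:
--         s = str(c)
--         if s.startswith("Entry_"):
--             entry.append(c)
--         elif s.startswith("Exit_"):
--             exit_c.append(c)
--         elif s.startswith("Continuous_"):
--             cont.append(c)
--         else:
--             rest.append(c)
--     return rest + sorted(entry) + sorted(exit_c) + sorted(cont)
-- ===== Notes on version B (the rewrite author's own statement) =====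
-- stated objective: simpler
-- what changed: Replaces three filter-comprehensions plus a set-membership scan for rest with a single classifying pass into four buckets (sorting the three snapshot buckets afterwards), so no tagged-set is ever built.
import Mathlib
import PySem

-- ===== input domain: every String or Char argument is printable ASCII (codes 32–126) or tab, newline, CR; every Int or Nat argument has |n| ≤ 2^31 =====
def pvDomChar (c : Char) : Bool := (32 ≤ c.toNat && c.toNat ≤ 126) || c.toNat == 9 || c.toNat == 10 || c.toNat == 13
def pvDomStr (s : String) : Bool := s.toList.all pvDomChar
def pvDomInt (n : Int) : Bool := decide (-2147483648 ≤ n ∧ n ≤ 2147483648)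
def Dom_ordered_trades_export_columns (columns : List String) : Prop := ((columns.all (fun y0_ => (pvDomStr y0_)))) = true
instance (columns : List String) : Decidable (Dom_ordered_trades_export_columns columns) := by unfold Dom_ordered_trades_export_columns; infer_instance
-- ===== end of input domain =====

-- B replaces A's three filter passes plus a tagged set with one classifying pass into four buckets (simpler; return value identical).


-- ===== PORT A =====
def ordered_trades_export_columns (columns : List String) : List String :=
  let cols := columns
  let entry := PySem.List.sorted (cols.filter (fun c => PySem.Str.startswith c "Entry_")) (fun x => x) false
  let exit_c := PySem.List.sorted (cols.filter (fun c => PySem.Str.startswith c "Exit_")) (fun x => x) false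
  let cont := PySem.List.sorted (cols.filter (fun c => PySem.Str.startswith c "Continuous_")) (fun x => x) false
  let tagged := PySem.Set.union (PySem.Set.union (PySem.Set.ofList entry) (PySem.Set.ofList exit_c)) (PySem.Set.ofList cont)
  let rest := cols.filter (fun c => !(PySem.Set.contains tagged c))
  rest ++ entry ++ exit_c ++ cont

-- ===== PORT B =====
def ordered_trades_export_columns_alt (columns : List String) : List String :=
  let buckets := columns.foldl
    (fun (acc : List String × List String × List String × List String) c =>
      let (rest, entry, exit_c, cont) := acc
      if PySem.Str.startswith c "Entry_" then (rest, entry ++ [c], exit_c, cont)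
      else if PySem.Str.startswith c "Exit_" then (rest, entry, exit_c ++ [c], cont)
      else if PySem.Str.startswith c "Continuous_" then (rest, entry, exit_c, cont ++ [c])
      else (rest ++ [c], entry, exit_c, cont))
    ([], [], [], [])
  buckets.1 ++ PySem.List.sorted buckets.2.1 (fun x => x) false
    ++ PySem.List.sorted buckets.2.2.1 (fun x => x) false
    ++ PySem.List.sorted buckets.2.2.2 (fun x => x) false

-- ===== PRECONDITION & SPEC =====
def Spec_ordered_trades_export_columns (columns : List String) (out : List String) : Prop := out = ordered_trades_export_columns_alt columns
instance (columns : List String) (out : List String) : Decidable (Spec_ordered_trades_export_columns columns out) := by unfold Spec_ordered_trades_export_columns; infer_instance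

-- ===== CLAIM (what is proved, stated in full; the proofs are below) =====
def Claim_equal_ordered_trades_export_columns : Prop := ∀ (columns : List String), Dom_ordered_trades_export_columns columns → Spec_ordered_trades_export_columns columns (ordered_trades_export_columns columns)

-- ===== LEMMAS AND PROOFS =====

-- Two incomparable prefixes cannot both be prefixes of the same string.
theorem pv_excl (l p q : List Char) (hpq : ¬ (p <+: q) ∧ ¬ (q <+: p))
    (h : PySem.Chars.startswith l p = true) : PySem.Chars.startswith l q = false := by
  rw [Bool.eq_false_iff]
  intro h2
  rw [PySem.Chars.startswith_iff] at h h2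
  rcases List.prefix_or_prefix_of_prefix h h2 with h3 | h3
  exacts [hpq.1 h3, hpq.2 h3]

theorem pv_excl_str (s p q : String) (hpq : ¬ (p.toList <+: q.toList) ∧ ¬ (q.toList <+: p.toList))
    (h : PySem.Str.startswith s p = true) : PySem.Str.startswith s q = false := by
  simp only [PySem.Str.startswith_eq] at h ⊢
  exact pv_excl s.toList p.toList q.toList hpq h

-- B's fold builds exactly the four filters of the input list.
theorem pv_fold_buckets (cols r e x k : List String) :
    cols.foldl
      (fun (acc : List String × List String × List String × List String) c =>
        let (rest, entry, exit_c, cont) := acc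
        if PySem.Str.startswith c "Entry_" then (rest, entry ++ [c], exit_c, cont)
        else if PySem.Str.startswith c "Exit_" then (rest, entry, exit_c ++ [c], cont)
        else if PySem.Str.startswith c "Continuous_" then (rest, entry, exit_c, cont ++ [c])
        else (rest ++ [c], entry, exit_c, cont))
      (r, e, x, k)
    = (r ++ cols.filter (fun c => !(PySem.Str.startswith c "Entry_")
          && !(PySem.Str.startswith c "Exit_") && !(PySem.Str.startswith c "Continuous_")),
       e ++ cols.filter (fun c => PySem.Str.startswith c "Entry_"),
       x ++ cols.filter (fun c => PySem.Str.startswith c "Exit_"),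
       k ++ cols.filter (fun c => PySem.Str.startswith c "Continuous_")) := by
  induction cols generalizing r e x k with
  | nil => simp
  | cons c cs ih =>
    simp only [List.foldl_cons, List.filter_cons]
    by_cases h1 : PySem.Str.startswith c "Entry_"
    · have hx := pv_excl_str c "Entry_" "Exit_" (by decide) h1
      have hk := pv_excl_str c "Entry_" "Continuous_" (by decide) h1
      simp [h1, hx, hk, ih, -PySem.Str.startswith_eq]
    · by_cases h2 : PySem.Str.startswith c "Exit_"
      · have hk := pv_excl_str c "Exit_" "Continuous_" (by decide) h2
        simp [h1, h2, hk, ih, -PySem.Str.startswith_eq]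
      · by_cases h3 : PySem.Str.startswith c "Continuous_"
        · simp [h1, h2, h3, ih, -PySem.Str.startswith_eq]
        · simp [h1, h2, h3, ih, -PySem.Str.startswith_eq]

-- A's "not in tagged" test agrees pointwise (on elements of cols) with B's "no prefix" test.
theorem pv_rest_filter (cols : List String) :
    cols.filter (fun c => !(PySem.Set.contains
        (PySem.Set.union (PySem.Set.union
          (PySem.Set.ofList (PySem.List.sorted (cols.filter (fun c => PySem.Str.startswith c "Entry_")) (fun x => x) false))
          (PySem.Set.ofList (PySem.List.sorted (cols.filter (fun c => PySem.Str.startswith c "Exit_")) (fun x => x) false)))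
          (PySem.Set.ofList (PySem.List.sorted (cols.filter (fun c => PySem.Str.startswith c "Continuous_")) (fun x => x) false))) c))
    = cols.filter (fun c => !(PySem.Str.startswith c "Entry_")
          && !(PySem.Str.startswith c "Exit_") && !(PySem.Str.startswith c "Continuous_")) := by
  apply List.filter_congr
  intro c hc
  simp [PySem.Set.mem_union, PySem.Set.mem_ofList,
    PySem.List.mem_sorted, List.mem_filter, hc]

-- ===== VERDICT (by name: the statement is the Claim_ definition above) =====
theorem ordered_trades_export_columns_spec : Claim_equal_ordered_trades_export_columns := by
  intro columns _
  unfold Spec_ordered_trades_export_columns ordered_trades_export_columns ordered_trades_export_columns_alt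
  simp only [pv_fold_buckets, List.nil_append]
  rw [pv_rest_filter]
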